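-- pv_equiv track=rewrite | github.com/amirawael90/Cryptography | monoalpha.py | decrypt_monoalphabetic
-- ===== SOURCE A (Python) =====
-- import string
--
-- def decrypt_monoalphabetic(ciphertext, key_mapping):
--     alphabet = string.ascii_lowercase
--     decrypted_text = ""
--
--     for char in ciphertext:
--         if char.lower() in key_mapping:
--             new_char = key_mapping[char.lower()]
--             if char.isupper():
--                 new_char = new_char.upper()
--             decrypted_text += new_char
--         else:
--             decrypted_text += char
--     return decrypted_text
-- ===== SOURCE B (Python) =====
-- def decrypt_monoalphabetic(ciphertext, key_mapping):
--     table = {}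
--     for k, v in key_mapping.items():
--         if len(k) == 1 and k == k.lower():
--             table[ord(k)] = v
--             if k.isalpha():
--                 table[ord(k.upper())] = v.upper()
--     return ciphertext.translate(table)
-- ===== Notes on version B (the rewrite author's own statement) =====
-- stated objective: idiomatic
-- what changed: Replaced the per-character dict-membership branch-and-concatenate loop by a translation table precomputed in one pass over the key mapping (lower- and upper-case entries at once) followed by a single str.translate call.
import Mathlib
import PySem

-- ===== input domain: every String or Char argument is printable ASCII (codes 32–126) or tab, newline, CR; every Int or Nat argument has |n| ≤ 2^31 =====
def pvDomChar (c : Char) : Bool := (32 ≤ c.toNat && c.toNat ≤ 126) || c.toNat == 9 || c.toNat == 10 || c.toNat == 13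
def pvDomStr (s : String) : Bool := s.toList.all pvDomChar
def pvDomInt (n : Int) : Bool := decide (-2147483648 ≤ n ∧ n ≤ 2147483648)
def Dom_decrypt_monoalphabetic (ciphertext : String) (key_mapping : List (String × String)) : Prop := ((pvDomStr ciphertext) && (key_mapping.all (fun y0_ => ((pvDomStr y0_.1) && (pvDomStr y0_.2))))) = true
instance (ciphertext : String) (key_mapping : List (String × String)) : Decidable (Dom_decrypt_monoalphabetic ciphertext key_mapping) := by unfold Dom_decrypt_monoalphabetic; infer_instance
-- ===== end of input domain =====

-- B replaces A's per-character dict-membership branch-and-concatenate loop by a precomputed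
-- char→string translation table (built in one pre-pass over the key mapping, lower- and
-- upper-case entries at once) and a single translate-style pass over the ciphertext (idiomatic).

-- ===== PORT A =====
-- literal transliteration of A: walk the ciphertext, look char.lower() up in the dict,
-- uppercase the replacement when the char is uppercase, else keep the char
def decrypt_monoalphabetic (ciphertext : String) (key_mapping : List (String × String)) : String :=
  String.ofList (ciphertext.toList.foldl (fun acc ch =>
    -- char.lower() of a single char is the one-char string of lowerChar
    match (PySem.Dict.ofList key_mapping).get? (String.ofList [PySem.Chars.lowerChar ch]) with
    | some nc => acc ++ (if PySem.Chars.isupper ch then PySem.Chars.upper nc.toList else nc.toList)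
    | none => acc ++ [ch]) [])

-- ===== PORT B =====
-- one step of B's table-building pre-pass: a single-char, lowercase-stable key k maps k↦v
-- and (when k is a letter) K↦V
def pvStep (t : PySem.Dict Char (List Char)) (kv : String × String) : PySem.Dict Char (List Char) :=
  match kv.1.toList with
  | [c] =>
    if PySem.Chars.lowerChar c == c then
      let t1 := t.insert c kv.2.toList
      if PySem.Chars.isalpha c then
        t1.insert (PySem.Chars.upperChar c) (PySem.Chars.upper kv.2.toList)
      else t1
    else t
  | _ => t

def decrypt_monoalphabetic_alt (ciphertext : String) (key_mapping : List (String × String)) : String :=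
  -- str.translate: each char is replaced by its table entry, absent chars unchanged
  String.ofList (ciphertext.toList.flatMap (fun c =>
    (((PySem.Dict.ofList key_mapping).items).foldl pvStep PySem.Dict.empty).getD c [c]))

-- ===== PRECONDITION & SPEC =====
def Spec_decrypt_monoalphabetic (ciphertext : String) (key_mapping : List (String × String)) (out : String) : Prop := out = decrypt_monoalphabetic_alt ciphertext key_mapping
instance (ciphertext : String) (key_mapping : List (String × String)) (out : String) : Decidable (Spec_decrypt_monoalphabetic ciphertext key_mapping out) := by unfold Spec_decrypt_monoalphabetic; infer_instance

-- ===== CLAIM (what is proved, stated in full; the proofs are below) =====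
def Claim_equal_decrypt_monoalphabetic : Prop := ∀ (ciphertext : String) (key_mapping : List (String × String)), Dom_decrypt_monoalphabetic ciphertext key_mapping → Spec_decrypt_monoalphabetic ciphertext key_mapping (decrypt_monoalphabetic ciphertext key_mapping)

-- ===== LEMMAS AND PROOFS =====

lemma pvOfNat_toNat (n : Nat) (h : n ≤ 1000) : (Char.ofNat n).toNat = n := by
  have : n.isValidChar := Or.inl (by omega)
  simp [Char.ofNat, this, Char.toNat, Char.ofNatAux]

lemma pvUpper_bounds (c : Char) (h : PySem.Chars.isupper c = true) : 65 ≤ c.toNat ∧ c.toNat ≤ 90 := by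
  simp only [PySem.Chars.isupper, Bool.and_eq_true, decide_eq_true_eq, Char.le_def] at h
  exact h

lemma pvLower_bounds (c : Char) (h : PySem.Chars.islower c = true) : 97 ≤ c.toNat ∧ c.toNat ≤ 122 := by
  simp only [PySem.Chars.islower, Bool.and_eq_true, decide_eq_true_eq, Char.le_def] at h
  exact h

lemma pvToNat_inj (c c' : Char) (h : c.toNat = c'.toNat) : c = c' := by
  apply Char.ext; exact UInt32.toNat_inj.mp h

lemma pvLower_not_upper (c : Char) (h : PySem.Chars.islower c = true) : PySem.Chars.isupper c = false := by
  obtain ⟨h1, h2⟩ := pvLower_bounds c h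
  by_contra hu
  obtain ⟨h3, h4⟩ := pvUpper_bounds c (by simpa using hu)
  omega

-- lowerChar fixes c iff c is not an uppercase letter
lemma pvLowerChar_fix (c : Char) : (PySem.Chars.lowerChar c = c) ↔ (PySem.Chars.isupper c = false) := by
  constructor
  · intro h
    by_contra hne
    have hu : PySem.Chars.isupper c = true := by simpa using hne
    obtain ⟨h1, h2⟩ := pvUpper_bounds c hu
    have : (PySem.Chars.lowerChar c).toNat = c.toNat + 32 := by
      simp [PySem.Chars.lowerChar, hu, pvOfNat_toNat (c.toNat + 32) (by omega)]
    rw [h] at this; omega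
  · intro h; simp [PySem.Chars.lowerChar, h]

lemma pvLowerChar_of_upper (c : Char) (h : PySem.Chars.isupper c = true) :
    PySem.Chars.islower (PySem.Chars.lowerChar c) = true ∧
    PySem.Chars.upperChar (PySem.Chars.lowerChar c) = c := by
  obtain ⟨h1, h2⟩ := pvUpper_bounds c h
  have ht : (PySem.Chars.lowerChar c).toNat = c.toNat + 32 := by
    simp [PySem.Chars.lowerChar, h, pvOfNat_toNat (c.toNat + 32) (by omega)]
  have hl : PySem.Chars.islower (PySem.Chars.lowerChar c) = true := by
    simp only [PySem.Chars.islower, Bool.and_eq_true, decide_eq_true_eq, Char.le_def]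
    change 97 ≤ (PySem.Chars.lowerChar c).toNat ∧ (PySem.Chars.lowerChar c).toNat ≤ 122
    omega
  refine ⟨hl, ?_⟩
  apply pvToNat_inj
  simp [PySem.Chars.upperChar, hl, ht]

lemma pvUpperChar_of_lower (c : Char) (h : PySem.Chars.islower c = true) :
    PySem.Chars.upperChar c ≠ c ∧ PySem.Chars.lowerChar (PySem.Chars.upperChar c) = c := by
  obtain ⟨h1, h2⟩ := pvLower_bounds c h
  have ht : (PySem.Chars.upperChar c).toNat = c.toNat - 32 := by
    simp [PySem.Chars.upperChar, h, pvOfNat_toNat (c.toNat - 32) (by omega)]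
  have hu : PySem.Chars.isupper (PySem.Chars.upperChar c) = true := by
    simp only [PySem.Chars.isupper, Bool.and_eq_true, decide_eq_true_eq, Char.le_def]
    change 65 ≤ (PySem.Chars.upperChar c).toNat ∧ (PySem.Chars.upperChar c).toNat ≤ 90
    omega
  constructor
  · intro hc; rw [hc] at ht; omega
  · apply pvToNat_inj
    simp [PySem.Chars.lowerChar, hu, ht, pvOfNat_toNat (c.toNat - 32 + 32) (by omega)]
    omega

-- the heart: for a key list with distinct keys, looking a character up in B's folded table
-- is exactly A's lookup of its lowercased one-char string, upper-cased back when needed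
lemma pvTable_getD (c : Char) (L : List (String × String))
    (hnd : (L.map Prod.fst).Nodup) (t : PySem.Dict Char (List Char)) :
    (L.foldl pvStep t).getD c [c] =
      match (L.find? (fun p => p.1 == String.ofList [PySem.Chars.lowerChar c])).map Prod.snd with
      | some v => if PySem.Chars.isupper c then PySem.Chars.upper v.toList else v.toList
      | none => t.getD c [c] := by
  induction L generalizing t with
  | nil => simp
  | cons p rest ih =>
    simp only [List.map_cons, List.nodup_cons, List.mem_map] at hnd
    obtain ⟨hp, hrest⟩ := hnd
    by_cases hm : p.1 = String.ofList [PySem.Chars.lowerChar c]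
    · -- this entry is the (unique) one A's lookup finds
      have hfind : rest.find? (fun q => q.1 == String.ofList [PySem.Chars.lowerChar c]) = none := by
        rw [List.find?_eq_none]
        intro q hq
        simp only [beq_iff_eq]
        intro he
        exact hp ⟨q, hq, by rw [he, ← hm]⟩
      have htoList : p.1.toList = [PySem.Chars.lowerChar c] := by
        rw [hm, String.toList_ofList]
      rw [List.foldl_cons, ih hrest, List.find?_cons_of_pos (by simpa using hm), hfind]
      simp only [Option.map_none, Option.map_some]
      -- now compute (pvStep t p).getD c [c]
      by_cases hu : PySem.Chars.isupper c = true
      · obtain ⟨hlo, hup⟩ := pvLowerChar_of_upper c hu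
        have hguard : PySem.Chars.lowerChar (PySem.Chars.lowerChar c) = PySem.Chars.lowerChar c :=
          (pvLowerChar_fix _).mpr (pvLower_not_upper _ hlo)
        have halpha : PySem.Chars.isalpha (PySem.Chars.lowerChar c) = true := by
          simp [PySem.Chars.isalpha, hlo]
        simp only [pvStep, htoList, hguard, beq_self_eq_true, if_true, halpha, hup, hu]
        rw [PySem.Dict.getD_insert_self]
      · have hfix : PySem.Chars.lowerChar c = c := (pvLowerChar_fix c).mpr (by simpa using hu)
        have hu' : PySem.Chars.isupper c = false := by simpa using hu
        simp only [pvStep, htoList, hfix, beq_self_eq_true, if_true, hu', Bool.false_eq_true,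
          if_false]
        by_cases ha : PySem.Chars.isalpha c = true
        · have hlo : PySem.Chars.islower c = true := by
            rcases (by simpa [PySem.Chars.isalpha] using ha : PySem.Chars.isupper c = true ∨ PySem.Chars.islower c = true) with h' | h'
            · rw [h'] at hu; exact absurd rfl hu
            · exact h'
          obtain ⟨hne, _⟩ := pvUpperChar_of_lower c hlo
          rw [if_pos ha, PySem.Dict.getD_insert_of_ne _ _ _ (Ne.symm hne),
            PySem.Dict.getD_insert_self]
        · rw [if_neg ha, PySem.Dict.getD_insert_self]
    · -- this entry is not A's key: it touches no table slot for c either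
      have hstep : (pvStep t p).getD c [c] = t.getD c [c] := by
        unfold pvStep
        cases hpl : p.1.toList with
        | nil => rfl
        | cons ck tl =>
          cases tl with
          | cons _ _ => rfl
          | nil =>
            by_cases hg : PySem.Chars.lowerChar ck = ck
            · have hckne : ck ≠ PySem.Chars.lowerChar c := by
                intro he
                apply hm
                conv_lhs => rw [← @String.ofList_toList p.1]
                rw [hpl, he]
              have hcne : c ≠ ck := by
                intro he
                apply hckne
                rw [← he] at hg ⊢
                exact hg.symm
              simp only [hg, beq_self_eq_true, if_true]
              by_cases ha : PySem.Chars.isalpha ck = true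
              · have hlo : PySem.Chars.islower ck = true := by
                  rcases (by simpa [PySem.Chars.isalpha] using ha : PySem.Chars.isupper ck = true ∨ PySem.Chars.islower ck = true) with h' | h'
                  · exact absurd hg (by rw [pvLowerChar_fix, h']; simp)
                  · exact h'
                have hcne2 : c ≠ PySem.Chars.upperChar ck := by
                  intro he
                  obtain ⟨_, hlc⟩ := pvUpperChar_of_lower ck hlo
                  exact hckne (by rw [he, hlc])
                rw [if_pos ha, PySem.Dict.getD_insert_of_ne _ _ _ hcne2,
                  PySem.Dict.getD_insert_of_ne _ _ _ hcne]
              · rw [if_neg ha, PySem.Dict.getD_insert_of_ne _ _ _ hcne]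
            · simp [hg]
      rw [List.foldl_cons, ih hrest, List.find?_cons_of_neg (by simpa using hm), hstep]

-- ===== VERDICT (by name: the statement is the Claim_ definition above) =====
theorem decrypt_monoalphabetic_spec : Claim_equal_decrypt_monoalphabetic := by
  intro ciphertext key_mapping _hdom
  unfold Spec_decrypt_monoalphabetic decrypt_monoalphabetic decrypt_monoalphabetic_alt
  have hbody : (fun (acc : List Char) (ch : Char) =>
      match (PySem.Dict.ofList key_mapping).get? (String.ofList [PySem.Chars.lowerChar ch]) with
      | some nc => acc ++ (if PySem.Chars.isupper ch then PySem.Chars.upper nc.toList else nc.toList)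
      | none => acc ++ [ch]) =
      (fun acc ch => acc ++ (match (PySem.Dict.ofList key_mapping).get? (String.ofList [PySem.Chars.lowerChar ch]) with
      | some nc => (if PySem.Chars.isupper ch then PySem.Chars.upper nc.toList else nc.toList)
      | none => [ch])) := by
    funext acc ch
    cases (PySem.Dict.ofList key_mapping).get? (String.ofList [PySem.Chars.lowerChar ch]) <;> rfl
  rw [hbody, PySem.List.foldl_append_eq_flatMap, List.nil_append]
  congr 1
  apply List.flatMap_congr  -- pointwise equality of the per-char functions
  intro ch _
  have hnd : (((PySem.Dict.ofList key_mapping).items).map Prod.fst).Nodup :=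
    PySem.Dict.nodup_keys_ofList key_mapping
  rw [pvTable_getD ch _ hnd PySem.Dict.empty]
  simp only [PySem.Dict.get?]
  rfl
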